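-- pv_equiv track=rewrite | github.com/Wameedh/CSC645-projects | Labs/lab0/lab0.py | merge_odds
-- ===== SOURCE A (Python) =====
-- def merge_odds(l1, l2):
--     odds = {}
--     # TODO: your code here
--     def sortListIntoDict(list, odds): # this method would search a given list and get the odds value,
--         # then it assign them into a dictionary with their index as a the key
--         for i, val in enumerate(list):  # iterate over the l1
--             if val % 2 != 0:  # check if the number is odd
--                 if i in odds.keys(): # check if key is exists
--                     odds[i].append(val) # will just add new value to that key without deleting the old value
--                 else:
--                     odds[i] = [val] # create new value in the dictionary
--
--     sortListIntoDict(l1, odds)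
--     sortListIntoDict(l2, odds)
--     return odds
-- ===== SOURCE B (Python) =====
-- def merge_odds(l1, l2):
--     # Build the key order first (l1's odd indices, then l2's new odd indices),
--     # then construct each value list directly by bounds-checked lookups.
--     k1 = [i for i, v in enumerate(l1) if v % 2 != 0]
--     seen = set(k1)
--     keys = k1 + [i for i, v in enumerate(l2) if v % 2 != 0 and i not in seen]
--
--     def odd_at(l, i):
--         return [l[i]] if i < len(l) and l[i] % 2 != 0 else []
--
--     return {i: odd_at(l1, i) + odd_at(l2, i) for i in keys}
-- ===== Notes on version B (the rewrite author's own statement) =====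
-- stated objective: alternative
-- what changed: B replaces A's two destructive dict-mutation passes (append-or-create per element) with a non-destructive construction: it first computes the key order (l1's odd indices, then l2's odd indices not already seen) and then builds each value list directly by bounds-checked lookups into l1 and l2.
import Mathlib
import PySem

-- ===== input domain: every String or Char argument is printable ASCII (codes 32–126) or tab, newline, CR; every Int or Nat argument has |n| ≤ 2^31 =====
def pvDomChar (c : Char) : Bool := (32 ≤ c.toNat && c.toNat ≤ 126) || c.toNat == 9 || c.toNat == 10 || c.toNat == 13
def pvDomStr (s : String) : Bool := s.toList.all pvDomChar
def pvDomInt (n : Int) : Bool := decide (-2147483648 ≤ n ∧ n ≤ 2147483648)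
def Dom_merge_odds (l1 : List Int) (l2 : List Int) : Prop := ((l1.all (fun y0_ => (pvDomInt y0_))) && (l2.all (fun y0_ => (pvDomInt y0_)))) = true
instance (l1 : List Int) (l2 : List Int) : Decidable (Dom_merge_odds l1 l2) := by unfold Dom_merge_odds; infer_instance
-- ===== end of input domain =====

-- B builds the dict non-destructively: key order first (l1's odd indices, then l2's
-- new odd indices), then each value list directly by bounds-checked lookups — an
-- alternative decomposition, no dict mutation; same cost.

-- ===== PORT A =====
-- helper: the nested 'sortListIntoDict(list, odds)' (mutates odds; here returns the new dict)
def sortListIntoDict (list : List Int) (odds : PySem.Dict Int (List Int)) : PySem.Dict Int (List Int) :=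
  (PySem.List.enumerate list).foldl (fun odds iv =>
    if PySem.Int.mod iv.2 2 != 0 then            -- if val % 2 != 0
      if odds.contains iv.1 then                  -- if i in odds.keys()
        odds.insert iv.1 (odds.getD iv.1 [] ++ [iv.2])   -- odds[i].append(val) (key exists, so getD _ [] = odds[i])
      else
        odds.insert iv.1 [iv.2]                   -- odds[i] = [val]
    else odds) odds

def merge_odds (l1 : List Int) (l2 : List Int) : List (Int × List Int) :=
  (sortListIntoDict l2 (sortListIntoDict l1 PySem.Dict.empty)).items

-- ===== PORT B =====
-- helper odd_at: '[l[i]] if i < len(l) and l[i] % 2 != 0 else []' (exact: i ≥ 0 at every call)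
def oddAt (l : List Int) (i : Int) : List Int :=
  match PySem.List.pyGet? l i with
  | some v => if PySem.Int.mod v 2 != 0 then [v] else []
  | none => []

def merge_odds_alt (l1 : List Int) (l2 : List Int) : List (Int × List Int) :=
  let k1 := (PySem.List.enumerate l1).filterMap
    (fun iv => if PySem.Int.mod iv.2 2 != 0 then some iv.1 else none)
  let seen := PySem.Set.ofList k1
  let keys := k1 ++ (PySem.List.enumerate l2).filterMap
    (fun iv => if PySem.Int.mod iv.2 2 != 0 && !(PySem.Set.contains seen iv.1) then some iv.1 else none)
  keys.map (fun i => (i, oddAt l1 i ++ oddAt l2 i))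

-- ===== PRECONDITION & SPEC =====
def Spec_merge_odds (l1 : List Int) (l2 : List Int) (out : List (Int × List Int)) : Prop := out = merge_odds_alt l1 l2
instance (l1 : List Int) (l2 : List Int) (out : List (Int × List Int)) : Decidable (Spec_merge_odds l1 l2 out) := by unfold Spec_merge_odds; infer_instance

-- ===== CLAIM (what is proved, stated in full; the proofs are below) =====
def Claim_equal_merge_odds : Prop := ∀ (l1 : List Int) (l2 : List Int), Dom_merge_odds l1 l2 → Spec_merge_odds l1 l2 (merge_odds l1 l2)

-- ===== LEMMAS AND PROOFS =====

-- generic: a foldl with an if-guard is a foldl over the filtered list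
theorem foldl_ite_filter {α β : Type} (l : List α) (p : α → Bool)
    (g : β → α → β) (d : β) :
    l.foldl (fun d x => if p x then g d x else d) d = (l.filter p).foldl g d := by
  induction l generalizing d with
  | nil => rfl
  | cons x xs ih =>
    by_cases h : p x <;> simp [h, ih]

-- A's loop body (for an odd value) is exactly Dict.modify
theorem stepA_eq_modify (d : PySem.Dict Int (List Int)) (iv : Int × Int) :
    (if d.contains iv.1 then d.insert iv.1 (d.getD iv.1 [] ++ [iv.2])
     else d.insert iv.1 [iv.2]) = d.modify iv.1 [] (fun x => x ++ [iv.2]) := by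
  by_cases h : d.contains iv.1
  · simp [h]; rfl
  · simp only [h, Bool.false_eq_true, if_false]
    show _ = d.insert iv.1 (d.getD iv.1 [] ++ [iv.2])
    rw [PySem.Dict.getD_of_not_contains d [] (by simpa using h)]
    rfl

theorem sortListIntoDict_eq (l : List Int) (d : PySem.Dict Int (List Int)) :
    sortListIntoDict l d =
      ((PySem.List.enumerate l).filter (fun iv => PySem.Int.mod iv.2 2 != 0)).foldl
        (fun d p => d.modify p.1 [] (fun x => x ++ [p.2])) d := by
  unfold sortListIntoDict
  have hfun : (fun (odds : PySem.Dict Int (List Int)) (iv : Int × Int) =>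
      if PySem.Int.mod iv.2 2 != 0 then
        (if odds.contains iv.1 then odds.insert iv.1 (odds.getD iv.1 [] ++ [iv.2])
         else odds.insert iv.1 [iv.2])
      else odds)
      = fun d iv => if PySem.Int.mod iv.2 2 != 0 then d.modify iv.1 [] (fun x => x ++ [iv.2]) else d := by
    funext d iv
    by_cases h : PySem.Int.mod iv.2 2 != 0
    · rw [if_pos h, if_pos h, stepA_eq_modify]
    · rw [if_neg h, if_neg h]
  rw [hfun, foldl_ite_filter]

-- filterMap with an if is map-of-filter
theorem filterMap_ite {α β : Type} (l : List α) (p : α → Bool) (f : α → β) :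
    l.filterMap (fun x => if p x then some (f x) else none) = (l.filter p).map f := by
  induction l with
  | nil => rfl
  | cons x xs ih => by_cases h : p x <;> simp [h, ih]

-- indices in enumerate are ≥ the start
theorem enum_fst_ge {α : Type} (xs : List α) (s : Int) (p : Int × α)
    (hp : p ∈ PySem.List.enumerate xs s) : s ≤ p.1 := by
  rw [PySem.List.mem_enumerate_iff] at hp
  obtain ⟨k, hk, rfl⟩ := hp
  simp

theorem oddAt_nil (i : Int) : oddAt [] i = [] := by
  simp [oddAt, PySem.List.pyGet?, PySem.List.pyIdx?]

-- the per-key value extracted from one enumerate pass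
theorem filt_enum (l : List Int) (s k : Int) (hs : s ≤ k) :
    ((PySem.List.enumerate l s).filter
        (fun iv => (PySem.Int.mod iv.2 2 != 0) && (iv.1 == k))).map (fun x => x.2)
      = oddAt l (k - s) := by
  induction l generalizing s with
  | nil => simp [PySem.List.enumerate_nil, oddAt_nil]
  | cons x xs ih =>
    rw [PySem.List.enumerate_cons]
    by_cases hk : k = s
    · subst hk
      have htail : (PySem.List.enumerate xs (k + 1)).filter
          (fun iv => (PySem.Int.mod iv.2 2 != 0) && (iv.1 == k)) = [] := by
        rw [List.filter_eq_nil_iff]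
        intro p hp
        have := enum_fst_ge xs (k + 1) p hp
        simp only [Bool.and_eq_true, not_and, beq_iff_eq]
        intro _ ; omega
      rw [List.filter_cons, show k - k = (0:Int) by omega]
      by_cases hodd : PySem.Int.mod x 2 != 0
      · rw [if_pos (by simpa using hodd), htail, List.map_cons, List.map_nil]
        simp only [oddAt, PySem.List.pyGet?_zero_cons]
        rw [if_pos hodd]
      · rw [if_neg (by simpa using hodd), htail, List.map_nil]
        simp only [oddAt, PySem.List.pyGet?_zero_cons]
        rw [if_neg hodd]
    · have hstep : oddAt (x :: xs) (k - s) = oddAt xs (k - (s + 1)) := by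
        have hn : k - s = ((k - s - 1).toNat : Int) + 1 := by omega
        have hm : ((k - s - 1).toNat : Int) = k - (s + 1) := by omega
        rw [hn]
        unfold oddAt
        rw [PySem.List.pyGet?_cons_succ]
        try rw [hm]
      rw [hstep, ← ih (s + 1) (by omega), List.filter_cons]
      rw [if_neg (by simp; intro _; omega)]

-- keys produced by one filtered enumerate pass are Nodup
theorem nodup_map_fst_filter (l : List Int) (p : Int × Int → Bool) :
    (((PySem.List.enumerate l).filter p).map (fun x => x.1)).Nodup := by
  have hsub : ((PySem.List.enumerate l).filter p).Sublist (PySem.List.enumerate l) :=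
    List.filter_sublist
  have hnd : ((PySem.List.enumerate l).map (fun x => x.1)).Nodup := by
    rw [show (fun x : Int × Int => x.1) = Prod.fst from rfl]
    rw [PySem.List.map_fst_enumerate l 0]
    exact PySem.List.nodup_pyRange_one 0 (0 + l.length)
  exact hnd.sublist (hsub.map _)

theorem merge_odds_main : ∀ (l1 l2 : List Int), merge_odds l1 l2 = merge_odds_alt l1 l2 := by
  intro l1 l2
  set oddp : Int × Int → Bool := fun iv => PySem.Int.mod iv.2 2 != 0 with hoddp
  set f1 := (PySem.List.enumerate l1).filter oddp with hf1
  set f2 := (PySem.List.enumerate l2).filter oddp with hf2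
  set stepM : PySem.Dict Int (List Int) → Int × Int → PySem.Dict Int (List Int) :=
    fun d p => d.modify p.1 [] (fun x => x ++ [p.2]) with hstepM
  have hA : merge_odds l1 l2 = ((f1 ++ f2).foldl stepM PySem.Dict.empty).items := by
    unfold merge_odds
    rw [sortListIntoDict_eq, sortListIntoDict_eq, List.foldl_append]
  set D := (f1 ++ f2).foldl stepM PySem.Dict.empty with hD
  have hkeysD : D.keys = PySem.Set.ofList (f1.map (fun x => x.1) ++ f2.map (fun x => x.1)) := by
    rw [hD, hstepM]
    rw [PySem.Dict.keys_foldl_modify_key (f1 ++ f2) Prod.fst [] (fun _ p x => x ++ [p.2])]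
    simp [PySem.Set.update_nil_left]
  have hnodD : D.keys.Nodup := by
    rw [hkeysD]; exact PySem.Set.nodup_ofList _
  have hgetD : ∀ k : Int, D.getD k [] =
      (f1.filter (fun p => p.1 == k)).map (fun x => x.2)
        ++ (f2.filter (fun p => p.1 == k)).map (fun x => x.2) := by
    intro k
    rw [hD, hstepM, PySem.Dict.getD_foldl_modify_append]
    simp [List.filter_append]
  have hpos : ∀ k ∈ D.keys, (0 : Int) ≤ k := by
    intro k hk
    rw [hkeysD] at hk
    have := (PySem.Set.mem_ofList _ _).mp hk
    rcases List.mem_append.mp this with h | h <;>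
    · obtain ⟨p, hp, rfl⟩ := List.mem_map.mp h
      exact enum_fst_ge _ 0 p (List.mem_of_mem_filter hp)
  have hval : ∀ k ∈ D.keys, D.getD k [] = oddAt l1 k ++ oddAt l2 k := by
    intro k hk
    have h0 := hpos k hk
    rw [hgetD k, hf1, hf2, List.filter_filter, List.filter_filter]
    have t1 := filt_enum l1 0 k h0
    have t2 := filt_enum l2 0 k h0
    rw [show k - 0 = k by omega] at t1 t2
    have hswap : ∀ (e : List Int),
        (PySem.List.enumerate e).filter (fun a => (a.1 == k) && oddp a)
          = (PySem.List.enumerate e).filter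
              (fun iv => (PySem.Int.mod iv.2 2 != 0) && (iv.1 == k)) := by
      intro e
      exact List.filter_congr (fun a _ => by rw [hoddp]; exact Bool.and_comm _ _)
    rw [hswap, hswap, t1, t2]
  set k1 := (PySem.List.enumerate l1).filterMap
      (fun iv => if PySem.Int.mod iv.2 2 != 0 then some iv.1 else none) with hk1
  have hk1' : k1 = f1.map (fun x => x.1) := by
    rw [hk1, hf1, hoddp, filterMap_ite]
  have hk1nd : k1.Nodup := by rw [hk1']; exact nodup_map_fst_filter l1 _
  set seen := PySem.Set.ofList k1 with hseen
  have hseen' : seen = k1 := PySem.Set.ofList_eq_self_of_nodup k1 hk1nd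
  set k2 := (PySem.List.enumerate l2).filterMap
      (fun iv => if PySem.Int.mod iv.2 2 != 0 && !(PySem.Set.contains seen iv.1) then some iv.1 else none) with hk2
  have hk2' : k2 = (f2.map (fun x => x.1)).filter (fun y => !PySem.Set.contains k1 y) := by
    rw [hk2, filterMap_ite, List.filter_map, hf2, List.filter_filter, hseen']
    exact congrArg _ (List.filter_congr (fun a _ => by rw [hoddp]; exact Bool.and_comm _ _))
  have hkeysB : D.keys = k1 ++ k2 := by
    rw [hkeysD, PySem.Set.ofList_append, PySem.Set.update_eq_append_filter, ← hk1',
        PySem.Set.ofList_eq_self_of_nodup _ (nodup_map_fst_filter l2 _), ← hseen, hseen', ← hk2']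
  rw [hA, PySem.Dict.items_eq_map_keys D hnodD []]
  show _ = merge_odds_alt l1 l2
  unfold merge_odds_alt
  show List.map (fun k => (k, D.getD k [])) D.keys
      = List.map (fun i => (i, oddAt l1 i ++ oddAt l2 i)) (k1 ++ k2)
  rw [← hkeysB]
  exact List.map_congr_left (fun k hk => by rw [hval k hk])

-- ===== VERDICT (by name: the statement is the Claim_ definition above) =====
theorem merge_odds_spec : Claim_equal_merge_odds := by
  intro l1 l2 _
  unfold Spec_merge_odds
  exact merge_odds_main l1 l2
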